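-- pv_equiv track=rewrite | github.com/BrandyIron/everydaycoding | atcoder/247/e2.py | f
-- ===== SOURCE A (Python) =====
-- def f(a):
--     ret, s = 0, 0
--     for x in a:
--         if x == 1:
--             ret += s * (s + 1)
--             s = 0
--         else:
--             s += 1
--     ret += s * (s + 1)
--     return ret
-- ===== SOURCE B (Python) =====
-- def f(a):
--     ones = [i for i, x in enumerate(a) if x == 1]
--     bounds = [-1] + ones + [len(a)]
--     return sum((q - p - 1) * (q - p) for p, q in zip(bounds, bounds[1:]))
-- ===== Notes on version B (the rewrite author's own statement) =====
-- stated objective: alternative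
-- what changed: B keeps no running run-length state at all: it first collects the positions of the marker 1s, brackets them with the virtual boundaries -1 and len(a), and sums the closed form (gap-1)*gap over each pair of consecutive boundaries, whereas A streams the list with a run-length accumulator.
import Mathlib
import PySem

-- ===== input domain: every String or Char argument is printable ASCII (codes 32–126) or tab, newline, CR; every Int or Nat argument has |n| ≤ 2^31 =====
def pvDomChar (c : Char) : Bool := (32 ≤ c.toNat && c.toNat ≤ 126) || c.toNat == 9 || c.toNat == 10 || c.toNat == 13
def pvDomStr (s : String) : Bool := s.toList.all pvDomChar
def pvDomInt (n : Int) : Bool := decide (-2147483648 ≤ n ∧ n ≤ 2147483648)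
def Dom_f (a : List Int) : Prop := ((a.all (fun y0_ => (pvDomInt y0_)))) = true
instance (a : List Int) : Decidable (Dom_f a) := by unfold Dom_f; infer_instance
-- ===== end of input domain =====

-- B drops A's streaming run-length accumulator: it collects the marker positions,
-- brackets them with -1 and len(a), and sums (gap-1)*gap over consecutive boundaries.

-- ===== PORT A =====
def fStepA (st : Int × Int) (x : Int) : Int × Int :=
  if x == 1 then (st.1 + st.2 * (st.2 + 1), 0) else (st.1, st.2 + 1)

def f (a : List Int) : Int :=
  let st := a.foldl fStepA (0, 0)
  st.1 + st.2 * (st.2 + 1)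

-- ===== PORT B =====
def f_alt (a : List Int) : Int :=
  let ones := ((PySem.List.enumerate a).filter (fun ix => ix.2 == 1)).map (fun ix => ix.1)
  let bounds := (-1 : Int) :: (ones ++ [(a.length : Int)])
  ((bounds.zip (PySem.List.slice bounds (some 1) none)).map
      (fun pq => (pq.2 - pq.1 - 1) * (pq.2 - pq.1))).sum

-- ===== PRECONDITION & SPEC =====
def Spec_f (a : List Int) (out : Int) : Prop := out = f_alt a
instance (a : List Int) (out : Int) : Decidable (Spec_f a out) := by unfold Spec_f; infer_instance

-- ===== CLAIM (what is proved, stated in full; the proofs are below) =====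
def Claim_equal_f : Prop := ∀ (a : List Int), Dom_f a → Spec_f a (f a)

-- ===== LEMMAS AND PROOFS =====

-- Common characterisation: total over the runs of a, with s the length of the run in progress.
def sumRuns : List Int → Int → Int
  | [], s => s * (s + 1)
  | x :: xs, s => if x = 1 then s * (s + 1) + sumRuns xs 0 else sumRuns xs (s + 1)

-- A's fold equals r plus the run total.
theorem fA_char (a : List Int) : ∀ (r s : Int),
    (a.foldl fStepA (r, s)).1 + (a.foldl fStepA (r, s)).2 * ((a.foldl fStepA (r, s)).2 + 1)
      = r + sumRuns a s := by
  induction a with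
  | nil => intro r s; simp [sumRuns]
  | cons x xs ih =>
    intro r s
    simp only [List.foldl_cons, fStepA, sumRuns]
    by_cases hx : x = 1
    · simp only [hx, beq_self_eq_true, if_true]
      rw [ih]; ring
    · simp only [beq_iff_eq, hx, if_false]
      rw [ih]

-- The pairwise sum over consecutive boundaries.
def pairSum (l : List Int) : Int :=
  ((l.zip l.tail).map (fun pq => (pq.2 - pq.1 - 1) * (pq.2 - pq.1))).sum

theorem pairSum_cons_cons (p q : Int) (t : List Int) :
    pairSum (p :: q :: t) = (q - p - 1) * (q - p) + pairSum (q :: t) := by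
  simp [pairSum]

-- Key: bracketed marker positions of a starting at index i, with previous boundary p,
-- sum to the run total with current run length i - p - 1.
theorem pairSum_ones (a : List Int) : ∀ (i p : Int),
    pairSum (p :: (((PySem.List.enumerate a i).filter (fun ix => ix.2 == 1)).map
        (fun ix => ix.1) ++ [i + (a.length : Int)]))
      = sumRuns a (i - p - 1) := by
  induction a with
  | nil => intro i p; simp [PySem.List.enumerate_nil, pairSum, sumRuns]
  | cons x xs ih =>
    intro i p
    rw [PySem.List.enumerate_cons]
    simp only [List.filter_cons, sumRuns, List.length_cons]
    push_cast
    by_cases hx : x = 1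
    · simp only [hx, beq_self_eq_true, if_true, List.map_cons, List.cons_append]
      rw [pairSum_cons_cons]
      have h0 := ih (i + 1) i
      rw [show i + 1 - i - 1 = 0 by ring] at h0
      rw [show i + ((xs.length : Int) + 1) = i + 1 + (xs.length : Int) by ring]
      rw [h0]; ring
    · simp only [beq_iff_eq, hx, if_false]
      have h1 := ih (i + 1) p
      rw [show i + 1 - p - 1 = i - p - 1 + 1 by ring] at h1
      rw [show i + ((xs.length : Int) + 1) = i + 1 + (xs.length : Int) by ring]
      exact h1

-- ===== VERDICT (by name: the statement is the Claim_ definition above) =====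
theorem f_spec : Claim_equal_f := by
  intro a _
  unfold Spec_f f f_alt
  show (List.foldl fStepA (0, 0) a).1
      + (List.foldl fStepA (0, 0) a).2 * ((List.foldl fStepA (0, 0) a).2 + 1)
    = ((((-1 : Int) :: _).zip (PySem.List.slice ((-1 : Int) :: _) (some 1) none)).map
        (fun pq => (pq.2 - pq.1 - 1) * (pq.2 - pq.1))).sum
  rw [PySem.List.slice_from_one]
  show _ = pairSum ((-1 : Int) :: (_ ++ [(a.length : Int)]))
  have hB := pairSum_ones a 0 (-1)
  rw [show (0 : Int) - (-1) - 1 = 0 by ring] at hB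
  simp only [zero_add] at hB
  rw [hB]
  have hA := fA_char a 0 0
  simp only [zero_add] at hA
  exact hA
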